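-- pv_equiv track=rewrite | github.com/TheGodZeno/Python_Stuff | Cyber/Vigenere/freqAnalysis.py | englishFreqMatchScore
-- ===== SOURCE A (Python) =====
-- import string
--
-- ETAOIN = 'ETAOINSHRDLCUMWFGYPBVKJXQZ' # שכיחות האותיות בשפה האנגלית.
--
-- LETTERS = string.ascii_uppercase
--
-- def getLetterCount(message):
--     letterCount = {'A': 0, 'B': 0, 'C': 0, 'D': 0, 'E': 0, 'F': 0, 'G': 0,
--                    'H': 0, 'I': 0, 'J': 0, 'K': 0, 'L': 0, 'M': 0, 'N': 0, 'O': 0, 'P': 0, 'Q': 0,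
--                    'R': 0, 'S': 0, 'T': 0, 'U': 0, 'V': 0, 'W': 0, 'X': 0, 'Y': 0, 'Z': 0}
--
--     for letter in message.upper():
--         if letter in LETTERS:
--             letterCount[letter] += 1
--
--     return letterCount
--
-- def getItemAtIndexZero(item):
--     return item[0]
--
-- def getFrequencyOrder(message):
--     letter_to_frequency = getLetterCount(message)
--
--
--     frequency_to_letter = {}
--     for letter in LETTERS:
--         if letter_to_frequency[letter] not in frequency_to_letter:
--             frequency_to_letter[letter_to_frequency[letter]] = [letter]
--         else:
--             frequency_to_letter[letter_to_frequency[letter]].append(letter)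
--
--
--     for freq in frequency_to_letter:
--         frequency_to_letter[freq].sort(key=ETAOIN.find, reverse=True)
--         frequency_to_letter[freq] = ''.join(frequency_to_letter[freq])
--
--
--     freqPairs = list(frequency_to_letter.items())
--     freqPairs.sort(key=getItemAtIndexZero, reverse=True)
--
--
--     freqOrder = []
--     for freqPair in freqPairs:
--         freqOrder.append(freqPair[1])
--
--     return ''.join(freqOrder)
--
-- def englishFreqMatchScore(message):
--     frequency_order = getFrequencyOrder(message)
--
--     match_score = 0
--
--     for common_letter in ETAOIN[:6]:
--         if common_letter in frequency_order[:6]: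
--             match_score += 1
--
--     for uncommon_letter in ETAOIN[-6:]:
--         if uncommon_letter in frequency_order[-6:]:
--             match_score += 1
--
--     return match_score
-- ===== SOURCE B (Python) =====
-- import string
--
-- ETAOIN = 'ETAOINSHRDLCUMWFGYPBVKJXQZ'
-- LETTERS = string.ascii_uppercase
--
-- def englishFreqMatchScore(message):
--     text = message.upper()
--     counts = {letter: text.count(letter) for letter in LETTERS}
--     frequency_order = ''.join(sorted(
--         LETTERS,
--         key=lambda letter: (counts[letter], ETAOIN.find(letter)),
--         reverse=True))
--     return (sum(letter in frequency_order[:6] for letter in ETAOIN[:6])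
--             + sum(letter in frequency_order[-6:] for letter in ETAOIN[-6:]))
-- ===== Notes on version B (the rewrite author's own statement) =====
-- stated objective: simpler
-- what changed: A's three-stage ordering (bucket letters by count into a dict of lists, sort each bucket by ETAOIN rank descending, then sort the buckets by count descending and concatenate) is collapsed into a single sort of the 26 letters keyed by (count, ETAOIN.find) with reverse=True, and counting is done with one str.count per letter instead of a per-character dict-update loop.
import Mathlib
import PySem

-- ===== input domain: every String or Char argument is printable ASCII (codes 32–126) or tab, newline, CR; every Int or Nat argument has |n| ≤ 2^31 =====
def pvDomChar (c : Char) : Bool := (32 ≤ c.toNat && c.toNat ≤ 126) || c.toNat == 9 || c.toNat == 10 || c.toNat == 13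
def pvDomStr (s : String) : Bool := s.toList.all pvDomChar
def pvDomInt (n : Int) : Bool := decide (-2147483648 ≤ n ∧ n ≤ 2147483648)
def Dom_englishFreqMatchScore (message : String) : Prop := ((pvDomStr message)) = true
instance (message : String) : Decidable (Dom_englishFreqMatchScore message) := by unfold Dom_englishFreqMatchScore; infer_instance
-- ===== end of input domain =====

-- B replaces A's three-stage ordering (bucket letters by count into a dict of lists, sort each bucket
-- by ETAOIN rank, sort the buckets by count) with a single keyed sort of the 26 letters; objective: simpler.

-- ===== PORT A =====
def ETAOINl : List Char := "ETAOINSHRDLCUMWFGYPBVKJXQZ".toList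

def LETTERSl : List Char := "ABCDEFGHIJKLMNOPQRSTUVWXYZ".toList   -- string.ascii_uppercase

-- message.upper() iterated char by char; 'letter in LETTERS' for a 1-char letter is list membership;
-- 'letterCount[letter] += 1' reads then stores (the key is always present when the guard holds)
def getLetterCount (message : String) : PySem.Dict Char Int :=
  (PySem.Chars.upper message.toList).foldl
    (fun d letter => if letter ∈ LETTERSl then d.insert letter (d.getD letter 0 + 1) else d)
    (PySem.Dict.ofList
      [('A', 0), ('B', 0), ('C', 0), ('D', 0), ('E', 0), ('F', 0), ('G', 0),
       ('H', 0), ('I', 0), ('J', 0), ('K', 0), ('L', 0), ('M', 0), ('N', 0), ('O', 0), ('P', 0), ('Q', 0),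
       ('R', 0), ('S', 0), ('T', 0), ('U', 0), ('V', 0), ('W', 0), ('X', 0), ('Y', 0), ('Z', 0)])

def getItemAtIndexZero (item : Int × List Char) : Int := item.1

-- the local variables of getFrequencyOrder are written inline (pure, so the value is unchanged):
-- first loop buckets the letters by frequency ('not in' branch first, as in the source);
-- the second loop overwrites the value at every existing key in iteration order, i.e. maps over the
-- items ('.sort(key=ETAOIN.find, reverse=True)' then ''.join'; strings are kept as List Char);
-- then freqPairs.sort(key=getItemAtIndexZero, reverse=True), the append loop, and ''.join(freqOrder)
def getFrequencyOrder (message : String) : List Char :=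
  ((PySem.List.sorted
      (PySem.Dict.mk
        ((LETTERSl.foldl
            (fun d letter =>
              if !d.contains ((getLetterCount message).getD letter 0) then
                d.insert ((getLetterCount message).getD letter 0) [letter]
              else
                d.modify ((getLetterCount message).getD letter 0) [] (· ++ [letter]))
            PySem.Dict.empty).items.map
          (fun p => (p.1, PySem.List.sorted p.2 (fun c => PySem.Chars.find ETAOINl [c]) true)))).items
      getItemAtIndexZero true).foldl
    (fun acc p => acc ++ [p.2]) ([] : List (List Char))).flatten

-- match_score = 0; two for-loops over the slices, each '+= 1' on a membership test
def englishFreqMatchScore (message : String) : Int :=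
  (PySem.List.slice ETAOINl (some (-6)) none).foldl
    (fun acc c => if c ∈ PySem.List.slice (getFrequencyOrder message) (some (-6)) none then acc + 1 else acc)
    ((PySem.List.slice ETAOINl none (some 6)).foldl
      (fun acc c => if c ∈ PySem.List.slice (getFrequencyOrder message) none (some 6) then acc + 1 else acc)
      (0 : Int))

-- ===== PORT B =====
-- counts = {letter: text.count(letter) for letter in LETTERS}; str.count with a 1-char needle
-- counts occurrences of that character, which is List.count (exact); then ONE keyed sort with
-- key = (counts[letter], ETAOIN.find(letter)), reverse=True, and the two membership sums
def englishFreqMatchScore_alt (message : String) : Int :=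
  ((PySem.List.slice ETAOINl none (some 6)).countP
      (fun c => decide (c ∈ PySem.List.slice
        (PySem.List.sorted2 LETTERSl
          (fun letter => (PySem.Dict.ofList (LETTERSl.map
            (fun letter => (letter, ((PySem.Chars.upper message.toList).count letter : Int))))).getD letter 0)
          (fun letter => PySem.Chars.find ETAOINl [letter]) true)
        none (some 6))) : Int)
  + ((PySem.List.slice ETAOINl (some (-6)) none).countP
      (fun c => decide (c ∈ PySem.List.slice
        (PySem.List.sorted2 LETTERSl
          (fun letter => (PySem.Dict.ofList (LETTERSl.map
            (fun letter => (letter, ((PySem.Chars.upper message.toList).count letter : Int))))).getD letter 0)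
          (fun letter => PySem.Chars.find ETAOINl [letter]) true)
        (some (-6)) none)) : Int)

-- ===== PRECONDITION & SPEC =====
def Spec_englishFreqMatchScore (message : String) (out : Int) : Prop := out = englishFreqMatchScore_alt message
instance (message : String) (out : Int) : Decidable (Spec_englishFreqMatchScore message out) := by unfold Spec_englishFreqMatchScore; infer_instance

-- ===== CLAIM (what is proved, stated in full; the proofs are below) =====
def Claim_equal_englishFreqMatchScore : Prop := ∀ (message : String), Dom_englishFreqMatchScore message → Spec_englishFreqMatchScore message (englishFreqMatchScore message)

-- ===== LEMMAS AND PROOFS =====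

-- the lexicographic order that Python's tuple key (count, rank) denotes
def lexKey (g : Char → Int) (c : Char) : Lex (Int × Int) := toLex (g c, PySem.Chars.find ETAOINl [c])

-- sorted2 (tuple key) is sorted with the lexicographic key
lemma sorted2_eq_sorted_lex (xs : List Char) (k1 k2 : Char → Int) :
    PySem.List.sorted2 xs k1 k2 true
      = PySem.List.sorted xs (fun x => toLex (k1 x, k2 x)) true := by
  have hlt : ∀ a b : Char,
      (decide (k1 a < k1 b) || (!decide (k1 b < k1 a) && decide (k2 a < k2 b)))
        = decide (toLex (k1 a, k2 a) < toLex (k1 b, k2 b)) := by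
    intro a b
    rcases lt_trichotomy (k1 a) (k1 b) with h | h | h
    · simp [Prod.Lex.lt_iff, h]
    · simp [Prod.Lex.lt_iff, h]
    · simp [Prod.Lex.lt_iff, h, not_lt_of_gt h, ne_of_gt h]
  simp only [PySem.List.sorted2, PySem.List.sorted, reduceIte]
  congr 1
  funext acc x
  congr 1
  funext a b
  exact hlt b a

-- a dict whose stored values are all 0 always reads back 0
lemma getD_update_zero (ps : List (Char × Int)) (d : PySem.Dict Char Int)
    (h : ∀ p ∈ ps, p.2 = 0) (c : Char) (hd : d.getD c 0 = 0) :
    (d.update ps).getD c 0 = 0 := by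
  induction ps generalizing d with
  | nil => simpa [PySem.Dict.update] using hd
  | cons p ps ih =>
      simp only [PySem.Dict.update, List.foldl_cons] at *
      apply ih
      · intro q hq; exact h q (List.mem_cons_of_mem _ hq)
      · rw [PySem.Dict.getD_insert]; split_ifs with hc
        · exact h p (List.mem_cons_self ..)
        · exact hd

-- A's letter counter, characterised
lemma getLetterCount_getD (message : String) (c : Char) :
    (getLetterCount message).getD c 0
      = if c ∈ LETTERSl then ((PySem.Chars.upper message.toList).count c : Int) else 0 := by
  have hbase : ∀ x : Char, (PySem.Dict.ofList
      [('A', (0:Int)), ('B', 0), ('C', 0), ('D', 0), ('E', 0), ('F', 0), ('G', 0),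
       ('H', 0), ('I', 0), ('J', 0), ('K', 0), ('L', 0), ('M', 0), ('N', 0), ('O', 0), ('P', 0), ('Q', 0),
       ('R', 0), ('S', 0), ('T', 0), ('U', 0), ('V', 0), ('W', 0), ('X', 0), ('Y', 0), ('Z', 0)]).getD x 0 = 0 := by
    intro x
    exact getD_update_zero _ _ (by decide) x (by simp [pysem])
  unfold getLetterCount
  rw [show (fun (d : PySem.Dict Char Int) letter => if letter ∈ LETTERSl then d.insert letter (d.getD letter 0 + 1) else d)
        = (fun (d : PySem.Dict Char Int) letter => if (· ∈ LETTERSl) letter then (fun (d : PySem.Dict Char Int) letter => d.insert letter (d.getD letter 0 + 1)) d letter else d) from rfl,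
     PySem.List.foldl_ite_eq_foldl_filter,
     PySem.Dict.getD_foldl_insert_add_one, hbase]
  split_ifs with hc
  · rw [List.count_filter (by simpa using hc)]; ring
  · rw [(List.count_eq_zero).2 (fun hmem => hc (by simpa using (List.mem_filter.1 hmem).2))]
    simp

-- B's counting dict, characterised
lemma counts_alt_getD (text : List Char) (c : Char) :
    (PySem.Dict.ofList (LETTERSl.map (fun letter => (letter, (text.count letter : Int))))).getD c 0
      = if c ∈ LETTERSl then (text.count c : Int) else 0 := by
  have hitems : (PySem.Dict.ofList (LETTERSl.map (fun letter => (letter, (text.count letter : Int))))).items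
      = LETTERSl.map (fun letter => (letter, (text.count letter : Int))) := by
    simp only [PySem.Dict.ofList, PySem.Dict.update]
    rw [List.foldl_map]
    simpa using PySem.Dict.items_foldl_insert_fresh LETTERSl (fun a => a)
      (fun a => (text.count a : Int)) PySem.Dict.empty (by simp) (by simp; decide)
  have hkeys : (PySem.Dict.ofList (LETTERSl.map (fun letter => (letter, (text.count letter : Int))))).keys
      = LETTERSl := by
    simp only [PySem.Dict.keys, hitems, List.map_map]; rfl
  split_ifs with hc
  · exact PySem.Dict.getD_of_mem_items _ (by rw [hitems]; exact List.mem_map_of_mem hc)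
      (by rw [hkeys]; decide) 0
  · exact PySem.Dict.getD_of_not_contains _ _
      (by rw [PySem.Dict.contains_eq_decide_mem_keys, hkeys]; simpa using hc)

lemma sum_map_ite_single {K : List Int} (hnd : K.Nodup) (x : Int) (n : Nat) :
    (K.map (fun k => if x = k then n else 0)).sum = if x ∈ K then n else 0 := by
  induction K with
  | nil => simp
  | cons k K ih =>
      rcases List.nodup_cons.1 hnd with ⟨hk, hnd'⟩
      by_cases hx : x = k
      · subst hx
        simp [List.sum_cons, ih hnd', hk]
      · simp [List.sum_cons, hx, ih hnd', List.mem_cons]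

-- grouping: concatenating the fibers of g over the distinct values of g is a permutation
lemma flatten_groups_perm (l : List Char) (g : Char → Int) :
    ((PySem.Set.ofList (l.map g)).map (fun k => l.filter (fun x => g x == k))).flatten.Perm l := by
  rw [List.perm_iff_count]
  intro a
  rw [List.count_flatten, List.map_map]
  have h1 : ∀ k ∈ PySem.Set.ofList (l.map g),
      (List.count a ∘ fun k => l.filter (fun x => g x == k)) k
        = if g a = k then l.count a else 0 := by
    intro k _
    by_cases h : g a = k
    · simp only [Function.comp]
      rw [if_pos h]
      exact List.count_filter (by simp [h])
    · simp only [Function.comp]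
      rw [if_neg h, List.count_eq_zero]
      intro hmem
      exact h (by simpa using (List.mem_filter.1 hmem).2)
  rw [List.map_congr_left h1, sum_map_ite_single (PySem.Set.nodup_ofList _)]
  by_cases ha : a ∈ l
  · rw [if_pos (by rw [PySem.Set.mem_ofList]; exact List.mem_map_of_mem ha)]
  · rw [List.count_eq_zero.2 ha]; simp

lemma flatten_map_perm (K : List Int) (f h : Int → List Char)
    (hp : ∀ k ∈ K, (f k).Perm (h k)) :
    ((K.map f).flatten).Perm ((K.map h).flatten) := by
  induction K with
  | nil => simp
  | cons k K ih =>
      simp only [List.map_cons, List.flatten_cons]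
      exact (hp k (List.mem_cons_self ..)).append
        (ih (fun q hq => hp q (List.mem_cons_of_mem _ hq)))

lemma find_nodup_on_letters : (LETTERSl.map (fun c => PySem.Chars.find ETAOINl [c])).Nodup := by
  decide

lemma find_inj_on_letters :
    ∀ a ∈ LETTERSl, ∀ b ∈ LETTERSl,
      PySem.Chars.find ETAOINl [a] = PySem.Chars.find ETAOINl [b] → a = b :=
  fun _ ha _ hb h => List.inj_on_of_nodup_map find_nodup_on_letters ha hb h

-- the heart: A's bucket-sort-flatten pipeline is one reverse sort by the lexicographic key
set_option maxHeartbeats 1000000 in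
lemma pipeline_eq (g : Char → Int) :
    ((PySem.List.sorted
        (PySem.Dict.mk
          ((LETTERSl.foldl
              (fun d letter =>
                if !d.contains (g letter) then d.insert (g letter) [letter]
                else d.modify (g letter) [] (· ++ [letter]))
              PySem.Dict.empty).items.map
            (fun p => (p.1, PySem.List.sorted p.2 (fun c => PySem.Chars.find ETAOINl [c]) true)))).items
        getItemAtIndexZero true).foldl
      (fun acc p => acc ++ [p.2]) ([] : List (List Char))).flatten
      = PySem.List.sorted LETTERSl (lexKey g) true := by
  have lettersNodup : LETTERSl.Nodup := by decide
  -- both branches of the bucketing step are d.modify (g letter) [] (· ++ [letter])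
  have hstep : (fun (d : PySem.Dict Int (List Char)) letter =>
      if !d.contains (g letter) then d.insert (g letter) [letter]
      else d.modify (g letter) [] (· ++ [letter]))
      = fun d letter => d.modify (g letter) [] (· ++ [letter]) := by
    funext d letter
    by_cases h : d.contains (g letter) = true
    · simp [h]
    · simp only [Bool.not_eq_true] at h
      simp [h, PySem.Dict.modify, PySem.Dict.getD_of_not_contains _ _ h]
  rw [hstep]
  set F := LETTERSl.foldl (fun d letter => d.modify (g letter) [] (· ++ [letter]))
    PySem.Dict.empty with hF
  have hkeys : F.keys = PySem.Set.ofList (LETTERSl.map g) := by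
    rw [hF]
    simpa using PySem.Dict.keys_foldl_modify_key LETTERSl g []
      (fun _ x v => v ++ [x]) PySem.Dict.empty
  have hnodup : F.keys.Nodup := by
    rw [hF]
    exact PySem.Dict.nodup_keys_foldl_modify_key LETTERSl g []
      (fun _ x v => v ++ [x]) PySem.Dict.empty (by simp)
  have hgetD : ∀ k, F.getD k [] = LETTERSl.filter (fun L => g L == k) := by
    intro k
    rw [hF,
      show LETTERSl.foldl (fun d letter => d.modify (g letter) [] (· ++ [letter])) PySem.Dict.empty
          = (LETTERSl.map (fun L => (g L, L))).foldl
              (fun d p => d.modify p.1 [] (· ++ [p.2])) PySem.Dict.empty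
        from (List.foldl_map (f := fun L : Char => ((g L, L) : Int × Char))
          (g := fun (d : PySem.Dict Int (List Char)) (p : Int × Char) => d.modify p.1 [] (· ++ [p.2]))
          (l := LETTERSl) (init := PySem.Dict.empty)).symm,
      PySem.Dict.getD_foldl_modify_append]
    simp [List.filter_map, List.map_map, Function.comp_def]
  have hitems : F.items = (PySem.Set.ofList (LETTERSl.map g)).map
      (fun k => (k, LETTERSl.filter (fun L => g L == k))) := by
    rw [PySem.Dict.items_eq_map_keys F hnodup [], hkeys]
    exact List.map_congr_left (fun k _ => by rw [hgetD])
  have hmk : ∀ (l : List (Int × List Char)), (PySem.Dict.mk l).items = l := fun _ => rfl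
  rw [hmk, hitems, List.map_map]
  set K := PySem.Set.ofList (LETTERSl.map g) with hK
  set sb := fun k => PySem.List.sorted (LETTERSl.filter (fun L => g L == k))
    (fun c => PySem.Chars.find ETAOINl [c]) true with hsb
  have hcomp : ((fun p : Int × List Char =>
        (p.1, PySem.List.sorted p.2 (fun c => PySem.Chars.find ETAOINl [c]) true)) ∘
        (fun k => (k, LETTERSl.filter (fun L => g L == k))))
      = fun k => (k, sb k) := rfl
  rw [hcomp]
  set SP := PySem.List.sorted (K.map (fun k => (k, sb k))) getItemAtIndexZero true with hSP
  have hfold : ∀ (l : List (Int × List Char)),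
      l.foldl (fun acc p => acc ++ [p.2]) ([] : List (List Char))
        = l.map (fun q : Int × List Char => q.2) := fun l => by
    simpa using PySem.List.foldl_append_singleton_eq_map (fun q : Int × List Char => q.2) l []
  rw [hfold]
  -- facts about the members of SP
  have hSPmem : ∀ p ∈ SP, p.1 ∈ K ∧ p.2 = sb p.1 := by
    intro p hp
    rw [hSP, PySem.List.mem_sorted] at hp
    obtain ⟨k, hk, rfl⟩ := List.mem_map.1 hp
    exact ⟨hk, rfl⟩
  have hbmem : ∀ k, ∀ c ∈ sb k, c ∈ LETTERSl ∧ g c = k := by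
    intro k c hc
    rw [hsb, PySem.List.mem_sorted, List.mem_filter] at hc
    exact ⟨hc.1, by simpa using hc.2⟩
  -- the flattened result is a permutation of the alphabet
  have h1 : SP.Perm (K.map (fun k => (k, sb k))) := PySem.List.sorted_perm _ _ _
  have hperm : ((SP.map (fun q : Int × List Char => q.2)).flatten).Perm LETTERSl := by
    have h3 : ((SP.map (fun q : Int × List Char => q.2)).flatten).Perm ((K.map sb).flatten) := by
      have := (h1.map (fun q : Int × List Char => q.2)).flatten
      rwa [List.map_map, show ((fun q : Int × List Char => q.2) ∘ fun k => (k, sb k)) = sb from rfl]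
        at this
    have h4 : ((K.map sb).flatten).Perm
        ((K.map (fun k => LETTERSl.filter (fun L => g L == k))).flatten) :=
      flatten_map_perm K sb _ (fun k _ => by rw [hsb]; exact PySem.List.sorted_perm _ _ _)
    exact h3.trans (h4.trans (flatten_groups_perm LETTERSl g))
  -- the flattened result is strictly decreasing in the lexicographic key
  have hfstlt : SP.Pairwise (fun p q => q.1 < p.1) := by
    have hle : SP.Pairwise (fun p q => getItemAtIndexZero q ≤ getItemAtIndexZero p) :=
      PySem.List.sorted_pairwise_rev _ _
    have hmapnd : (SP.map (fun p : Int × List Char => p.1)).Nodup := by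
      have hmp := h1.map (fun p : Int × List Char => p.1)
      rw [List.map_map, show ((fun p : Int × List Char => p.1) ∘ fun k => (k, sb k)) = id from rfl,
        List.map_id] at hmp
      exact (hmp.nodup_iff).2 (PySem.Set.nodup_ofList _)
    have hne : SP.Pairwise (fun p q : Int × List Char => p.1 ≠ q.1) :=
      List.pairwise_map.1 hmapnd
    exact (hle.and hne).imp (fun h => lt_of_le_of_ne h.1 (Ne.symm h.2))
  have hpw : ((SP.map (fun q : Int × List Char => q.2)).flatten).Pairwise
      (fun a b => lexKey g b < lexKey g a) := by
    rw [List.pairwise_flatten]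
    constructor
    · intro l hl
      obtain ⟨p, hp, rfl⟩ := List.mem_map.1 hl
      obtain ⟨hk, h2⟩ := hSPmem p hp
      rw [h2]
      have hsorted : (sb p.1).Pairwise (fun a b =>
          PySem.Chars.find ETAOINl [b] ≤ PySem.Chars.find ETAOINl [a]) := by
        rw [hsb]; exact PySem.List.sorted_pairwise_rev _ _
      have hnd : (sb p.1).Nodup := by
        rw [hsb]
        exact ((PySem.List.sorted_perm _ _ _).nodup_iff).2 (lettersNodup.filter _)
      refine ((hsorted.and hnd).imp_of_mem ?_)
      intro a b ha hb hab
      obtain ⟨haL, hag⟩ := hbmem _ _ ha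
      obtain ⟨hbL, hbg⟩ := hbmem _ _ hb
      have hfind : PySem.Chars.find ETAOINl [b] < PySem.Chars.find ETAOINl [a] :=
        lt_of_le_of_ne hab.1
          (fun he => hab.2 (find_inj_on_letters a haL b hbL (Eq.symm he)) )
      simp only [lexKey, Prod.Lex.lt_iff, ofLex_toLex]
      exact Or.inr ⟨by rw [hbg, hag], hfind⟩
    · rw [List.pairwise_map]
      refine hfstlt.imp_of_mem ?_
      intro p q hp hq hlt x hx y hy
      obtain ⟨_, hp2⟩ := hSPmem p hp
      obtain ⟨_, hq2⟩ := hSPmem q hq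
      have hgx : g x = p.1 := (hbmem _ _ (hp2 ▸ hx)).2
      have hgy : g y = q.1 := (hbmem _ _ (hq2 ▸ hy)).2
      simp only [lexKey, Prod.Lex.lt_iff, ofLex_toLex]
      exact Or.inl (by rw [hgx, hgy]; exact hlt)
  exact (PySem.List.sorted_rev_eq_of_perm_of_pairwise_gt LETTERSl _ (lexKey g) hperm hpw).symm

-- the two frequency orders coincide
lemma frequency_order_eq (message : String) :
    getFrequencyOrder message
      = PySem.List.sorted2 LETTERSl
          (fun letter =>
            (PySem.Dict.ofList (LETTERSl.map (fun letter => (letter,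
              ((PySem.Chars.upper message.toList).count letter : Int))))).getD letter 0)
          (fun letter => PySem.Chars.find ETAOINl [letter]) true := by
  have hk : lexKey (fun letter => (getLetterCount message).getD letter 0)
      = lexKey (fun letter =>
            (PySem.Dict.ofList (LETTERSl.map (fun letter => (letter,
              ((PySem.Chars.upper message.toList).count letter : Int))))).getD letter 0) := by
    funext c
    unfold lexKey
    beta_reduce
    rw [getLetterCount_getD, counts_alt_getD]
  exact (pipeline_eq (fun letter => (getLetterCount message).getD letter 0)).trans
    ((congrArg (fun k => PySem.List.sorted LETTERSl k true) hk).trans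
      (sorted2_eq_sorted_lex LETTERSl _ (fun letter => PySem.Chars.find ETAOINl [letter])).symm)

-- ===== VERDICT (by name: the statement is the Claim_ definition above) =====
theorem englishFreqMatchScore_spec : Claim_equal_englishFreqMatchScore := by
  intro message _
  show englishFreqMatchScore message = englishFreqMatchScore_alt message
  unfold englishFreqMatchScore englishFreqMatchScore_alt
  rw [frequency_order_eq message]
  rw [show ∀ S : List Char, (fun (acc : Int) c => if c ∈ S then acc + 1 else acc)
        = (fun (acc : Int) c => if (· ∈ S) c then acc + 1 else acc) from fun _ => rfl]
  rw [PySem.List.foldl_ite_add_one, PySem.List.foldl_ite_add_one]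
  ring
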